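-- pv_equiv track=rewrite | github.com/aorursy/KT_dataset_py | ayakhaled2_movie-recommendation-algorithm.py | setGenresMatrix
-- ===== SOURCE A (Python) =====
-- genresList = [
--
--   "Action",
--
--   "Adventure",
--
--   "Animation",
--
--   "Children",
--
--   "Comedy",
--
--   "Crime",
--
--   "Documentary",
--
--   "Drama",
--
--   "Fantasy",
--
--   "Film-Noir",
--
--   "Horror",
--
--   "Musical",
--
--   "Mystery",
--
--   "Romance",
--
--   "Sci-Fi",
--
--   "Thriller",
--
--   "War",
--
--   "Western",
--
--   "(no genres listed)"
--
-- ]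
--
-- def setGenresMatrix(genres):
--
--     movieGenresMatrix = []
--
--     movieGenresList = genres.split('|')
--
--     for x in genresList:
--
--         if (x in movieGenresList):
--
--             movieGenresMatrix.append(1)
--
--         else:
--
--             movieGenresMatrix.append(0)
--
--     return movieGenresMatrix
-- ===== SOURCE B (Python) =====
-- genresList = [
--   "Action",
--   "Adventure",
--   "Animation",
--   "Children",
--   "Comedy",
--   "Crime",
--   "Documentary",
--   "Drama",
--   "Fantasy",
--   "Film-Noir",
--   "Horror",
--   "Musical",
--   "Mystery",
--   "Romance",
--   "Sci-Fi",
--   "Thriller",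
--   "War",
--   "Western",
--   "(no genres listed)"
-- ]
--
-- _genreIndex = {g: i for i, g in enumerate(genresList)}
--
-- def setGenresMatrix(genres):
--     movieGenresMatrix = [0] * len(genresList)
--     for g in genres.split('|'):
--         i = _genreIndex.get(g)
--         if i is not None:
--             movieGenresMatrix[i] = 1
--     return movieGenresMatrix
-- ===== Notes on version B (the rewrite author's own statement) =====
-- stated objective: alternative
-- what changed: Instead of testing every fixed genre for membership in the split list, B precomputes a genre-to-index dict once, starts from an all-zeros vector and scatters 1s by iterating over the input's own genres; unknown genres are skipped.
import Mathlib
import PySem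

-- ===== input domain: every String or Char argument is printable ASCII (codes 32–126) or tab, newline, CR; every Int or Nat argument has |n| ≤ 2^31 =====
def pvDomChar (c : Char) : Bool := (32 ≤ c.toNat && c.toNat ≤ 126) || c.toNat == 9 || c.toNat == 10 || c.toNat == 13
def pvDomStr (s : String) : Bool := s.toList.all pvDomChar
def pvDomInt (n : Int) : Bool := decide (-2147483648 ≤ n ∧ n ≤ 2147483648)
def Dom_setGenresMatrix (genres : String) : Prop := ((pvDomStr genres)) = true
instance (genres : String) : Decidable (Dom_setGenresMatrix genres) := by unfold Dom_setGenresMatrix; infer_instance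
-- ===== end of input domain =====

-- B replaces the per-genre membership scan with a precomputed genre→index dict and
-- scatters 1s into an all-zeros vector driven by the input's own genres (alternative decomposition, same result).

-- ===== PORT A =====
def genresListL : List String :=
  ["Action", "Adventure", "Animation", "Children", "Comedy", "Crime", "Documentary",
   "Drama", "Fantasy", "Film-Noir", "Horror", "Musical", "Mystery", "Romance",
   "Sci-Fi", "Thriller", "War", "Western", "(no genres listed)"]

def setGenresMatrix (genres : String) : List Int :=
  let movieGenresList := (PySem.Str.split? genres "|").getD []
  genresListL.foldl (fun acc x => if x ∈ movieGenresList then acc ++ [1] else acc ++ [0]) []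

-- ===== PORT B =====
-- _genreIndex = {g: i for i, g in enumerate(genresList)}
def genreIndex : PySem.Dict String Int :=
  (PySem.List.enumerate genresListL).foldl (fun d p => d.insert p.2 p.1) PySem.Dict.empty

-- the body of B's loop: i = _genreIndex.get(g); if i is not None: matrix[i] = 1
def scatterStep (v : List Int) (g : String) : List Int :=
  match genreIndex.get? g with
  | some i => PySem.List.pySetD v i 1
  | none => v

def setGenresMatrix_alt (genres : String) : List Int :=
  ((PySem.Str.split? genres "|").getD []).foldl scatterStep (List.replicate genresListL.length 0)

-- ===== PRECONDITION & SPEC =====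
def Spec_setGenresMatrix (genres : String) (out : List Int) : Prop := out = setGenresMatrix_alt genres
instance (genres : String) (out : List Int) : Decidable (Spec_setGenresMatrix genres out) := by unfold Spec_setGenresMatrix; infer_instance

-- ===== CLAIM (what is proved, stated in full; the proofs are below) =====
def Claim_equal_setGenresMatrix : Prop := ∀ (genres : String), Dom_setGenresMatrix genres → Spec_setGenresMatrix genres (setGenresMatrix genres)

-- ===== LEMMAS AND PROOFS =====

theorem foldl_insert_get?_not_mem (ps : List (Int × String)) (d : PySem.Dict String Int)
    (g : String) (hg : g ∉ ps.map (·.2)) :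
    (ps.foldl (fun d p => d.insert p.2 p.1) d).get? g = d.get? g := by
  induction ps generalizing d with
  | nil => rfl
  | cons p ps ih =>
    simp only [List.map_cons, List.mem_cons, not_or] at hg
    simp only [List.foldl_cons]
    rw [ih _ hg.2, PySem.Dict.get?_insert_of_ne _ _ hg.1]

theorem genreIndex_get_mem (i : Nat) (h : i < 19) :
    genreIndex.get? (genresListL.getD i "") = some (i : Int) := by
  interval_cases i <;> decide

theorem genreIndex_get_not_mem (g : String) (hg : g ∉ genresListL) :
    genreIndex.get? g = none := by
  unfold genreIndex
  rw [foldl_insert_get?_not_mem]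
  · simp [pysem]
  · rw [PySem.List.map_snd_enumerate]; exact hg

theorem scatterStep_length (v : List Int) (g : String) :
    (scatterStep v g).length = v.length := by
  cases h : genreIndex.get? g <;>
    simp [scatterStep, h, PySem.List.length_pySetD]

theorem scatterStep_getElem (v : List Int) (g : String) (hv : v.length = genresListL.length)
    (i : Nat) (hi : i < genresListL.length) :
    (scatterStep v g)[i]'(by rw [scatterStep_length, hv]; exact hi) =
      if genresListL[i] = g then 1 else v[i]'(hv ▸ hi) := by
  by_cases hg : g ∈ genresListL
  · obtain ⟨j, hj, hgj⟩ := List.getElem_of_mem hg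
    have hj' : j < 19 := by simpa [genresListL] using hj
    have hgj' := genreIndex_get_mem j hj'
    rw [List.getD_eq_getElem _ _ hj, hgj] at hgj'
    simp only [scatterStep, hgj', PySem.List.pySetD_natCast, List.getElem_set]
    have hnd : genresListL.Nodup := by decide
    have : genresListL[i] = g ↔ j = i := by
      rw [← hgj]
      constructor
      · intro he; exact (List.Nodup.getElem_inj_iff hnd).mp he.symm
      · intro he; subst he; rfl
    simp only [this]
  · simp only [scatterStep, genreIndex_get_not_mem g hg]
    have : genresListL[i] ≠ g := fun he => hg (he ▸ List.getElem_mem hi)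
    simp [this]

theorem foldl_scatter_length (parts : List String) (v : List Int) :
    (parts.foldl scatterStep v).length = v.length := by
  induction parts generalizing v with
  | nil => rfl
  | cons g parts ih => simp only [List.foldl_cons]; rw [ih, scatterStep_length]

theorem foldl_scatter_getElem (parts : List String) (v : List Int)
    (hv : v.length = genresListL.length) (i : Nat) (hi : i < genresListL.length) :
    (parts.foldl scatterStep v)[i]'(by rw [foldl_scatter_length, hv]; exact hi) =
      if genresListL[i] ∈ parts then 1 else v[i]'(hv ▸ hi) := by
  induction parts generalizing v with
  | nil => simp
  | cons g parts ih =>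
    simp only [List.foldl_cons]
    rw [ih (scatterStep v g) (by rw [scatterStep_length, hv])]
    rw [scatterStep_getElem v g hv i hi]
    by_cases h1 : genresListL[i] ∈ parts <;> by_cases h2 : genresListL[i] = g <;>
      simp [h1, h2, List.mem_cons]

theorem setGenresMatrix_eq_map (genres : String) :
    setGenresMatrix genres =
      genresListL.map
        (fun x => if x ∈ (PySem.Str.split? genres "|").getD [] then (1 : Int) else 0) := by
  unfold setGenresMatrix
  have hfun : (fun (acc : List Int) x =>
        if x ∈ (PySem.Str.split? genres "|").getD [] then acc ++ [1] else acc ++ [0]) =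
      (fun acc x => acc ++ [if x ∈ (PySem.Str.split? genres "|").getD [] then (1 : Int) else 0]) := by
    funext acc x; split <;> simp_all
  simp only []
  rw [hfun, PySem.List.foldl_append_singleton_eq_map]
  simp

-- ===== VERDICT (by name: the statement is the Claim_ definition above) =====
theorem setGenresMatrix_spec : Claim_equal_setGenresMatrix := by
  intro genres _
  unfold Spec_setGenresMatrix setGenresMatrix_alt
  rw [setGenresMatrix_eq_map]
  have hrep : (List.replicate genresListL.length (0 : Int)).length = genresListL.length :=
    List.length_replicate
  apply List.ext_getElem
  · rw [List.length_map, foldl_scatter_length, hrep]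
  · intro i hi _
    have hig : i < genresListL.length := by simpa using hi
    rw [List.getElem_map]
    rw [foldl_scatter_getElem _ _ hrep i hig]
    rw [List.getElem_replicate]
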